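-- pv_equiv track=rewrite | github.com/lirzhi/review_agent | agent_backend/utils/parser/markdown_parser.py | _normalize_markdown_body
-- ===== SOURCE A (Python) =====
-- from typing import Any, Dict, List, Optional
--
-- def _normalize_markdown_body(lines: List[str]) -> str:
--     normalized: List[str] = []
--     blank_streak = 0
--     for raw_line in lines:
--         line = raw_line.rstrip()
--         if not line.strip():
--             blank_streak += 1
--             if blank_streak <= 1:
--                 normalized.append("")
--             continue
--         blank_streak = 0
--         normalized.append(line)
--     return "\n".join(normalized).strip()
-- ===== SOURCE B (Python) =====
-- def _normalize_markdown_body(lines):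
--     stripped = [l.rstrip() for l in lines]
--     kept = [l for prev, l in zip([""] + stripped, stripped) if l or prev]
--     return "\n".join(kept).strip()
-- ===== Notes on version B (the rewrite author's own statement) =====
-- stated objective: simpler
-- what changed: Replaces the stateful blank_streak counter loop (with continue and conditional appends) by a stateless pipeline: rstrip every line, keep a line iff it or its predecessor (via zip with the shifted list) is non-empty, then join and strip.
import Mathlib
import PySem

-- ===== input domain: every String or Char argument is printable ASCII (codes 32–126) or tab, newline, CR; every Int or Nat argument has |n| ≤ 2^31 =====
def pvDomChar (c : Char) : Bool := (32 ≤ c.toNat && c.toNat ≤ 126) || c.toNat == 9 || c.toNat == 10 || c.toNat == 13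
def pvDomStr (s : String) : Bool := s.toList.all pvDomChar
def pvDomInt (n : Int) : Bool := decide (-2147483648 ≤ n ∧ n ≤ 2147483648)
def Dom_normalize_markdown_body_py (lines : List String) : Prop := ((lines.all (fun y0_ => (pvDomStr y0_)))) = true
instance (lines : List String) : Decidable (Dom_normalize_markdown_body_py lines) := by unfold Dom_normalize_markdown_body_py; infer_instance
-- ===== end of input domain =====

-- B replaces A's blank_streak state machine by a stateless pipeline (rstrip all lines,
-- keep a line iff it or its predecessor is non-empty via zip with the shifted list,
-- join, strip); objective: simpler.

-- ===== PORT A =====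
-- loop body of A, extracted as a helper (state = (blank_streak, normalized))
def pvStepA (st : Int × List String) (raw_line : String) : Int × List String :=
  let line := PySem.Str.rstrip raw_line
  if PySem.Str.strip line = "" then
    let blank_streak := st.1 + 1
    (blank_streak, if blank_streak ≤ 1 then st.2 ++ [""] else st.2)
  else
    (0, st.2 ++ [line])

def normalize_markdown_body_py (lines : List String) : String :=
  let st := lines.foldl pvStepA (0, [])
  PySem.Str.strip (PySem.Str.join "\n" st.2)

-- ===== PORT B =====
def normalize_markdown_body_py_alt (lines : List String) : String :=
  let stripped := lines.map PySem.Str.rstrip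
  let kept := ((("" :: stripped).zip stripped).filter
      (fun p => !(p.2 = "") || !(p.1 = ""))).map (·.2)
  PySem.Str.strip (PySem.Str.join "\n" kept)

-- ===== PRECONDITION & SPEC =====
def Spec_normalize_markdown_body_py (lines : List String) (out : String) : Prop := out = normalize_markdown_body_py_alt lines
instance (lines : List String) (out : String) : Decidable (Spec_normalize_markdown_body_py lines out) := by unfold Spec_normalize_markdown_body_py; infer_instance

-- ===== CLAIM (what is proved, stated in full; the proofs are below) =====
def Claim_equal_normalize_markdown_body_py : Prop := ∀ (lines : List String), Dom_normalize_markdown_body_py lines → Spec_normalize_markdown_body_py lines (normalize_markdown_body_py lines)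

-- ===== LEMMAS AND PROOFS =====

-- the common abstraction: pvKeep pn ls keeps every non-empty line, and an empty line iff
-- the previous line was non-empty (pn = "previous line non-blank"; at the start A has pn = true, B pn = false)
def pvKeep : Bool → List String → List String
  | _, [] => []
  | pn, l :: ls => if l = "" then (if pn then "" :: pvKeep false ls else pvKeep false ls) else l :: pvKeep true ls

theorem pv_dropWhile_forall {α : Type} (p : α → Bool) (l : List α) :
    (∀ a ∈ l.dropWhile p, p a) ↔ (∀ a ∈ l, p a) := by
  constructor
  · intro h a ha
    rcases List.mem_append.1 ((List.takeWhile_append_dropWhile (p := p) (l := l)) ▸ ha) with h' | h'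
    · exact List.mem_takeWhile_imp h'
    · exact h a h'
  · intro h a ha
    exact h a (List.dropWhile_subset p ha)

theorem pv_rstrip_nil_iff (cs : List Char) :
    PySem.Chars.rstrip cs = [] ↔ ∀ c ∈ cs, PySem.Chars.isspace c := by
  simp [PySem.Chars.rstrip, List.dropWhile_eq_nil_iff]

theorem pv_strip_nil_iff (cs : List Char) :
    PySem.Chars.strip cs = [] ↔ ∀ c ∈ cs, PySem.Chars.isspace c := by
  rw [PySem.Chars.strip, pv_rstrip_nil_iff]
  constructor
  · intro h c hc
    have := (pv_dropWhile_forall PySem.Chars.isspace cs).1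
    exact this (by simpa [PySem.Chars.lstrip] using h) c hc
  · intro h c hc
    exact h c (List.dropWhile_subset _ hc)

theorem pv_chars_strip_rstrip_nil (cs : List Char) :
    PySem.Chars.strip (PySem.Chars.rstrip cs) = [] ↔ PySem.Chars.rstrip cs = [] := by
  rw [pv_strip_nil_iff, pv_rstrip_nil_iff]
  constructor
  · intro h c hc
    by_cases hmem : c ∈ PySem.Chars.rstrip cs
    · exact h c hmem
    · -- c was dropped by rstrip: it lies in the dropWhile-prefix of cs.reverse, so isspace c
      have hrev : c ∈ cs.reverse := List.mem_reverse.2 hc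
      rcases List.mem_append.1
          ((List.takeWhile_append_dropWhile (p := PySem.Chars.isspace) (l := cs.reverse)) ▸ hrev)
        with h' | h'
      · exact List.mem_takeWhile_imp h'
      · exact absurd (by simpa [PySem.Chars.rstrip] using h') hmem
  · intro h c hc
    exact h c (List.mem_reverse.1 (List.dropWhile_subset _ (List.mem_reverse.1 hc)))

theorem pv_strip_rstrip_nil_iff (s : String) :
    (PySem.Str.strip (PySem.Str.rstrip s) = "") ↔ (PySem.Str.rstrip s = "") := by
  simp only [← String.toList_eq_nil_iff]
  simp only [PySem.Str.strip, PySem.Str.rstrip, String.toList_ofList]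
  exact pv_chars_strip_rstrip_nil s.toList

-- the A-side fold computes acc ++ pvKeep (bs == 0) (map rstrip ls)
theorem pv_foldA (ls : List String) : ∀ (bs : Int) (acc : List String), 0 ≤ bs →
    (ls.foldl pvStepA (bs, acc)).2 = acc ++ pvKeep (bs == 0) (ls.map PySem.Str.rstrip) := by
  induction ls with
  | nil => intro bs acc h; simp [pvKeep]
  | cons raw ls ih =>
    intro bs acc h
    rw [List.foldl_cons, List.map_cons]
    by_cases hb : PySem.Str.strip (PySem.Str.rstrip raw) = ""
    · have hline : PySem.Str.rstrip raw = "" := (pv_strip_rstrip_nil_iff raw).1 hb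
      by_cases hz : bs = 0
      · subst hz
        have hstep : pvStepA (0, acc) raw = (1, acc ++ [""]) := by
          simp [pvStepA, hb]
        rw [hstep, ih 1 (acc ++ [""]) (by norm_num)]
        simp [pvKeep, hline]
      · have hstep : pvStepA (bs, acc) raw = (bs + 1, acc) := by
          simp only [pvStepA, if_pos hb]
          have : ¬ bs + 1 ≤ 1 := by omega
          simp [this]
        rw [hstep, ih (bs + 1) acc (by omega)]
        have h1 : (bs == 0) = false := by simp [hz]
        have h2 : (bs + 1 == 0) = false := by simp; omega
        simp [pvKeep, hline, h1, h2]
    · have hne : PySem.Str.rstrip raw ≠ "" := fun h' => hb (by rw [h']; rfl)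
      have hstep : pvStepA (bs, acc) raw = (0, acc ++ [PySem.Str.rstrip raw]) := by
        simp [pvStepA, hb]
      rw [hstep, ih 0 (acc ++ [PySem.Str.rstrip raw]) (by norm_num)]
      simp [pvKeep, hne]

-- the B-side zip/filter computes pvKeep (prev ≠ "") ls
theorem pv_foldB (ls : List String) : ∀ (prev : String),
    (((prev :: ls).zip ls).filter (fun p => !(p.2 = "") || !(p.1 = ""))).map (·.2)
      = pvKeep (!(prev = "")) ls := by
  induction ls with
  | nil => intro prev; simp [pvKeep]
  | cons l ls ih =>
    intro prev
    rw [List.zip_cons_cons, List.filter_cons]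
    by_cases hl : l = ""
    · subst hl
      by_cases hp : prev = ""
      · subst hp
        have hc : (!decide (("" : String) = "") || !decide (("" : String) = "")) = false := by decide
        rw [hc, if_neg (by simp)]
        rw [ih ""]
        simp [pvKeep]
      · have hc : (!decide (("" : String) = "") || !decide (prev = "")) = true := by simp [hp]
        rw [hc]
        simp only [if_true, List.map_cons]
        rw [ih ""]
        simp [pvKeep, hp]
    · have hc : (!decide (l = "") || !decide (prev = "")) = true := by simp [hl]
      rw [hc]
      simp only [if_true, List.map_cons]
      rw [ih l]
      simp [pvKeep, hl]

theorem pv_strip_newline_cons (cs : List Char) :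
    PySem.Chars.strip ('\n' :: cs) = PySem.Chars.strip cs := by
  simp [PySem.Chars.strip, PySem.Chars.lstrip,
    show PySem.Chars.isspace '\n' = true from rfl]

-- stripping the join absorbs a leading empty line
theorem pv_strip_join_empty_cons (K : List String) :
    PySem.Str.strip (PySem.Str.join "\n" ("" :: K)) = PySem.Str.strip (PySem.Str.join "\n" K) := by
  cases K with
  | nil => rfl
  | cons k ks =>
    simp only [PySem.Str.join, PySem.Str.strip, String.toList_ofList]
    have hjoin : PySem.Chars.join "\n".toList (List.map String.toList ("" :: k :: ks))
        = '\n' :: PySem.Chars.join "\n".toList (List.map String.toList (k :: ks)) := by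
      simp [PySem.Chars.join, List.intercalate]
    rw [hjoin, pv_strip_newline_cons]

theorem pv_keep_true_eq (ls : List String) :
    PySem.Str.strip (PySem.Str.join "\n" (pvKeep true ls))
      = PySem.Str.strip (PySem.Str.join "\n" (pvKeep false ls)) := by
  cases ls with
  | nil => rfl
  | cons l ls =>
    by_cases hl : l = ""
    · simp only [pvKeep, if_pos hl]
      exact pv_strip_join_empty_cons (pvKeep false ls)
    · simp [pvKeep, hl]

-- ===== VERDICT (by name: the statement is the Claim_ definition above) =====
theorem normalize_markdown_body_py_spec : Claim_equal_normalize_markdown_body_py := by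
  intro lines _
  show normalize_markdown_body_py lines = normalize_markdown_body_py_alt lines
  unfold normalize_markdown_body_py normalize_markdown_body_py_alt
  show PySem.Str.strip (PySem.Str.join "\n" (lines.foldl pvStepA (0, [])).2)
      = PySem.Str.strip (PySem.Str.join "\n"
          (((("" :: lines.map PySem.Str.rstrip).zip (lines.map PySem.Str.rstrip)).filter
            (fun p => !(p.2 = "") || !(p.1 = ""))).map (·.2)))
  rw [pv_foldA lines 0 [] le_rfl, pv_foldB (lines.map PySem.Str.rstrip) ""]
  simp only [List.nil_append]
  have h1 : ((0 : Int) == 0) = true := by decide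
  have h2 : (!decide True) = false := by decide
  rw [h1, h2]
  exact pv_keep_true_eq (lines.map PySem.Str.rstrip)
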